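-- pv_equiv track=rewrite | github.com/juanyisus03/tonterias | combinador.py | increase_array
-- ===== SOURCE A (Python) =====
-- def increase_array(arr, numMax):
--     n = len(arr)
--     i = n - 1  # Comenzar desde la última posición
--     while i >= 0:
--         arr[i] += 1  # Aumentar en 1 el valor en la posición actual
--         if arr[i] == numMax:  # Si el valor es numMax, cambiarlo a 0 y mover a la siguiente posición
--             arr[i] = 0
--             i -= 1  # Mover a la siguiente posición
--             if i < 0:  # Si la primera posición llega a 4, aumentar la longitud del array
--                 arr.insert(0, 0)  # Insertar un 0 al inicio del array
--                 break  # Detener el bucle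
--         else:
--             break  # Si no es numMax, detener el bucle
--     return arr
-- ===== SOURCE B (Python) =====
-- def increase_array(arr, numMax):
--     # Functional rebuild: find the carry-chain length k (trailing digits equal to
--     # numMax-1) on the reversed list, then construct the result by slicing and
--     # concatenation instead of mutating digit by digit. Returns a NEW list.
--     n = len(arr)
--     rev = arr[::-1]
--     k = next((j for j, d in enumerate(rev) if d != numMax - 1), n)
--     if k < n:
--         return arr[:n - k - 1] + [arr[n - k - 1] + 1] + [0] * k
--     return [0] * (n + 1) if n else arr
-- ===== Notes on version B (the rewrite author's own statement) =====
-- stated objective: alternative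
-- what changed: Replaces A's in-place right-to-left increment/reset mutation loop by a functional rebuild: the carry-chain length k is read off the reversed list with a single generator lookup, and the result is constructed in one step by slicing and concatenation (arr[:n-k-1] + [pivot+1] + [0]*k, or all zeros with a leading 0 on full overflow); B does not mutate arr.
import Mathlib
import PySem

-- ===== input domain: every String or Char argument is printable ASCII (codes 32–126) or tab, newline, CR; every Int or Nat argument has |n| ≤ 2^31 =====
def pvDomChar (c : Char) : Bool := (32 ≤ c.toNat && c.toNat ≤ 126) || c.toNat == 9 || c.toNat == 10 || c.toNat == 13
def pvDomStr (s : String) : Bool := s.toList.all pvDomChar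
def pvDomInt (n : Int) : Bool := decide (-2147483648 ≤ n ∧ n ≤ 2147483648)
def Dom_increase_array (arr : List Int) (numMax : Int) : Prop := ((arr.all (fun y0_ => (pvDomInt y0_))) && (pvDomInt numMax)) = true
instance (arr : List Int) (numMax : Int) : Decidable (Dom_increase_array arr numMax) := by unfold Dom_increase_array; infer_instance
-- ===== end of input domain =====

-- B rebuilds the result functionally (carry-chain length on the reversed list, then
-- slice-and-concatenate) instead of A's in-place digit-by-digit carry loop
-- (objective: alternative). A mutates arr in place, B returns a new list; the
-- equivalence proved here is about the RETURN value only.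


-- ===== PORT A =====
-- A's while-loop: i runs from n-1 downward; at each step arr[i] += 1, and if the new
-- value equals numMax it is reset to 0 and the loop moves left (prepending 0 when it
-- falls off the front); otherwise it stops.  i is always in range, so arr[i] is getD.
def increase_array_loopA (numMax : Int) (arr : List Int) (i : Nat) : List Int :=
  let a1 := arr.set i (arr.getD i 0 + 1)
  if a1.getD i 0 == numMax then
    let a2 := a1.set i 0
    match i with
    | 0 => 0 :: a2
    | j + 1 => increase_array_loopA numMax a2 j
  else a1

def increase_array (arr : List Int) (numMax : Int) : List Int :=
  if arr.isEmpty then arr else increase_array_loopA numMax arr (arr.length - 1)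

-- ===== PORT B =====
-- B: k = position of the first digit ≠ numMax-1 in the reversed list (n if none);
-- then one slice-and-concatenate rebuild.  arr[::-1] is List.reverse; the `next`
-- over `enumerate` with default n is List.findIdx (which returns the length when
-- no element matches); arr[:n-k-1] with 0 ≤ n-k-1 is List.take; [0]*k is replicate.
def increase_array_alt (arr : List Int) (numMax : Int) : List Int :=
  let n := arr.length
  let rev := arr.reverse
  let k := rev.findIdx (fun d => d != numMax - 1)
  if k < n then
    arr.take (n - k - 1) ++ [arr.getD (n - k - 1) 0 + 1] ++ List.replicate k 0
  else if n ≠ 0 then List.replicate (n + 1) 0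
  else arr

-- ===== PRECONDITION & SPEC =====
def Spec_increase_array (arr : List Int) (numMax : Int) (out : List Int) : Prop := out = increase_array_alt arr numMax
instance (arr : List Int) (numMax : Int) (out : List Int) : Decidable (Spec_increase_array arr numMax out) := by unfold Spec_increase_array; infer_instance

-- ===== CLAIM (what is proved, stated in full; the proofs are below) =====
def Claim_equal_increase_array : Prop := ∀ (arr : List Int) (numMax : Int), Dom_increase_array arr numMax → Spec_increase_array arr numMax (increase_array arr numMax)

-- ===== LEMMAS AND PROOFS =====

theorem take_set_of_le (l : List Int) (n m : Nat) (a : Int) (h : m ≤ n) : (l.set n a).take m = l.take m := by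
  rw [List.take_set, List.set_eq_of_length_le (by simp; omega)]

theorem drop_set_self (l : List Int) (n : Nat) (a : Int) (h : n < l.length) : (l.set n a).drop n = a :: l.drop (n+1) := by
  rw [List.set_eq_take_append_cons_drop, if_pos h]
  have hl : n = (l.take n).length := (List.length_take_of_le (by omega)).symm
  nth_rewrite 1 [hl]
  exact List.drop_left ..

theorem loopA_formula (numMax : Int) :
    ∀ (i : Nat) (arr : List Int), i < arr.length →
      increase_array_loopA numMax arr i =
        (let k := ((arr.take (i+1)).reverse).findIdx (fun d => d != numMax - 1)
         if k ≤ i then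
           arr.take (i - k) ++ [arr.getD (i - k) 0 + 1] ++ List.replicate k 0 ++ arr.drop (i+1)
         else 0 :: List.replicate (i+1) 0 ++ arr.drop (i+1)) := by
  intro i
  induction i with
  | zero =>
    intro arr h
    have ht : arr.take 1 = [arr[0]'h] := by
      rw [List.take_add_one]; simp [h]
    unfold increase_array_loopA
    simp only [ht, List.reverse_singleton, List.findIdx_cons, List.findIdx_nil]
    by_cases hc : arr[0]'h = numMax - 1
    · have : (arr[0]'h != numMax - 1) = false := by simp [hc]
      simp only [this, cond_false, List.getD, List.getElem?_set_self,
        List.getElem?_eq_getElem, h, Option.getD_some]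
      have hm : arr[0]'h + 1 = numMax := by omega
      simp only [hm, beq_self_eq_true, if_true, List.set_set]
      rw [if_neg (by omega)]
      rw [List.set_eq_take_append_cons_drop, if_pos h]
      simp [List.replicate]

    · have : (arr[0]'h != numMax - 1) = true := by simp [hc]
      simp only [this, cond_true, List.getD, List.getElem?_set_self,
        List.getElem?_eq_getElem, h, Option.getD_some]
      have hm : ¬ (arr[0]'h + 1 = numMax) := by omega
      simp only [beq_iff_eq, hm, if_false]
      rw [if_pos (Nat.le_refl 0)]
      rw [List.set_eq_take_append_cons_drop, if_pos h]
      simp [List.replicate]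

  | succ j ih =>
    intro arr h
    have hj : j + 1 ≤ arr.length := by omega
    have ht : arr.take (j+2) = arr.take (j+1) ++ [arr[j+1]'h] := by
      rw [List.take_add_one]; simp [h]
    unfold increase_array_loopA
    simp only [ht, List.reverse_append, List.reverse_singleton, List.singleton_append,
      List.findIdx_cons]
    by_cases hc : arr[j+1]'h = numMax - 1
    · -- carry: recurse
      have hb : (arr[j+1]'h != numMax - 1) = false := by simp [hc]
      simp only [hb, cond_false, List.getD, List.getElem?_set_self,
        List.getElem?_eq_getElem, h, Option.getD_some]
      have hm : arr[j+1]'h + 1 = numMax := by omega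
      simp only [hm, beq_self_eq_true, if_true, List.set_set]
      set a2 := arr.set (j+1) 0 with ha2
      have hlen : j < a2.length := by simp [ha2]; omega
      rw [ih a2 hlen]
      have htk : a2.take (j+1) = arr.take (j+1) := take_set_of_le arr (j+1) (j+1) 0 (le_refl _)
      have hdr : a2.drop (j+1) = 0 :: arr.drop (j+2) := drop_set_self arr (j+1) 0 h
      simp only [htk, hdr]
      set k' := ((arr.take (j+1)).reverse).findIdx (fun d => d != numMax - 1) with hk'
      by_cases hkj : k' ≤ j
      · rw [if_pos hkj, if_pos (by omega : k' + 1 ≤ j + 1)]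
        have h1 : j + 1 - (k' + 1) = j - k' := by omega
        have h2 : a2.take (j - k') = arr.take (j - k') :=
          take_set_of_le arr (j+1) (j - k') 0 (by omega)
        have h3 : a2.getD (j - k') 0 = arr.getD (j - k') 0 := by
          simp only [List.getD, ha2]
          rw [List.getElem?_set_ne (by omega)]
        rw [h1, h2, h3]
        simp [List.replicate_succ']
      · rw [if_neg hkj, if_neg (by omega : ¬ (k' + 1 ≤ j + 1))]
        simp [List.replicate_succ']
    · -- stop
      have hb : (arr[j+1]'h != numMax - 1) = true := by simp [hc]
      simp only [hb, cond_true, List.getD, List.getElem?_set_self,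
        List.getElem?_eq_getElem, h, Option.getD_some]
      have hm : ¬ (arr[j+1]'h + 1 = numMax) := by omega
      simp only [beq_iff_eq, hm, if_false]
      rw [if_pos (Nat.zero_le _)]
      rw [List.set_eq_take_append_cons_drop, if_pos h]
      simp [List.replicate, h]


-- ===== VERDICT (by name: the statement is the Claim_ definition above) =====

theorem increase_array_spec : Claim_equal_increase_array := by
  intro arr numMax _
  unfold Spec_increase_array increase_array increase_array_alt
  by_cases he : arr.isEmpty
  · have : arr = [] := by simpa [List.isEmpty_iff] using he
    subst this; simp
  · have hne : arr ≠ [] := by simpa [List.isEmpty_iff] using he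
    have hpos : 0 < arr.length := List.length_pos_of_ne_nil hne
    have h : arr.length - 1 < arr.length := by omega
    rw [if_neg he, loopA_formula numMax (arr.length - 1) arr h]
    have ht : arr.take (arr.length - 1 + 1) = arr := by
      rw [Nat.sub_add_cancel hpos]; exact List.take_length
    have hd : arr.drop (arr.length - 1 + 1) = [] := by
      rw [Nat.sub_add_cancel hpos]; exact List.drop_length
    simp only [ht, hd, List.append_nil]
    set k := arr.reverse.findIdx (fun d => d != numMax - 1) with hk
    by_cases hki : k ≤ arr.length - 1
    · rw [if_pos hki, if_pos (by omega)]
      have : arr.length - 1 - k = arr.length - k - 1 := by omega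
      rw [this]
    · have hkn : ¬ k < arr.length := by omega
      rw [if_neg hki, if_neg hkn, if_pos (by omega)]
      have : arr.length - 1 + 1 = arr.length := by omega
      rw [this]
      simp [List.replicate_succ]
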